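/- GENERATED by farm/mkstatement.py from design/units.tsv (unit `decode_all`) and the Specs of Vorbis/Spec/*.lean — do not edit.
   THE STATEMENT of the proof unit `decode_all`: the function `decode_all` (111 instructions) satisfies its contract,
   given the contracts of its callees. What the names mean: Vorbis/Spec/Basic.lean. The theorem to prove:
   `theorem decode_all_ok : Vorbis.Spec.decode_all.Statement`. -/
import Vorbis.Spec.Alloc
import Vorbis.Spec.Top
namespace Vorbis.Spec.decode_all
open X86 X86.User Asan

/-- The statement of unit `decode_all`. -/
def Statement : Prop :=
  ∀ (Lay : Layout) (_hLay : Lay.hi = 0x1000000) (μ : Microarch) (_hμ : UserX.MicroOK μ) (u₀ : State)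
    (_hcode : HasCodeNat Lay u₀ Vorbis.L.decode_all.entry Vorbis.Code.code_decode_all.nat Vorbis.L.decode_all.size)
    (_h_stb_vorbis_open_memory : ∀ (others : List Obj) (frames : List (Nat × FrameLayout)) (len : Nat), Calls Lay μ Vorbis.WayInv (Vorbis.conv u₀) Vorbis.L.stb_vorbis_open_memory.entry (Vorbis.Spec.stb_vorbis_open_memory.spec others frames len))
    (_h_asan_load4_noabort : Asan.SmallCheck Lay μ Vorbis.WayInv (Vorbis.CodeOK u₀) [.rax, .rcx, .rdx] 4 Vorbis.L.__asan_load4_noabort.entry)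
    (_h_stb_vorbis_get_frame_float : ∀ (others : List Obj) (frames : List (Nat × FrameLayout)) (len : Nat) (A : Arena) (stored room : Int) (ysz : Nat → Nat), Calls Lay μ Vorbis.WayInv (Vorbis.conv u₀) Vorbis.L.stb_vorbis_get_frame_float.entry (Vorbis.Spec.stb_vorbis_get_frame_float.spec others frames len A stored room ysz))
    (_h_copy_frame : ∀ (others : List Obj) (frames : List (Nat × FrameLayout)), Calls Lay μ Vorbis.WayInv (Vorbis.conv u₀) Vorbis.L.copy_frame.entry (Vorbis.Spec.copy_frame.spec others frames))
    (_h_put_header : ∀ (others : List Obj) (frames : List (Nat × FrameLayout)), Calls Lay μ Vorbis.WayInv (Vorbis.conv u₀) Vorbis.L.put_header.entry (Vorbis.Spec.put_header.spec others frames))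
    (_h_stb_vorbis_get_error : ∀ (others : List Obj) (frames : List (Nat × FrameLayout)), Calls Lay μ Vorbis.WayInv (Vorbis.conv u₀) Vorbis.L.stb_vorbis_get_error.entry (Vorbis.Spec.stb_vorbis_get_error.spec others frames))
    (_h_stb_vorbis_close : ∀ (others : List Obj) (frames : List (Nat × FrameLayout)) (Blk : Block → Prop), Calls Lay μ Vorbis.WayInv (Vorbis.conv u₀) Vorbis.L.stb_vorbis_close.entry (Vorbis.Spec.stb_vorbis_close.spec others frames Blk)),
    ∀ (others : List Obj) (frames : List (Nat × FrameLayout)) (len : Nat), Calls Lay μ Vorbis.WayInv (Vorbis.conv u₀) Vorbis.L.decode_all.entry (Vorbis.Spec.decode_all.spec others frames len)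

end Vorbis.Spec.decode_all
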